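-- pv_equiv track=rewrite | github.com/EnzoFmx/TERMINALE_NSI | 97_TEST/IE/Recursivite/Correction.py | dentiste
-- ===== SOURCE A (Python) =====
-- def dentiste(texte) :
--     voyelles = ["a","e","i","o","u","y"]
--     if len(texte) == 1 :
--         if texte[0] in voyelles :
--             return texte[0]
--     else :
--         if texte[0] in voyelles :
--             return texte[0] + dentiste(texte[1:])
--         else :
--             return dentiste(texte[1:])
-- ===== SOURCE B (Python) =====
-- def dentiste(texte):
--     return "".join(c for c in texte if c in "aeiouy")
-- ===== Notes on version B (the rewrite author's own statement) =====
-- stated objective: faster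
-- what changed: B replaces A's head-recursion (which re-slices texte[1:] at every step, quadratic) by a single linear filter pass joining the vowels; Pre_ excludes inputs where A raises (empty string: IndexError; string ending in a non-vowel but containing a vowel: TypeError from str+None) or returns None instead of a string (no vowels and non-vowel last char).
-- outside the precondition, e.g. on dentiste('b'): A returns None, B returns ''; on dentiste('bcd'): A returns None, B returns ''
import Mathlib
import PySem

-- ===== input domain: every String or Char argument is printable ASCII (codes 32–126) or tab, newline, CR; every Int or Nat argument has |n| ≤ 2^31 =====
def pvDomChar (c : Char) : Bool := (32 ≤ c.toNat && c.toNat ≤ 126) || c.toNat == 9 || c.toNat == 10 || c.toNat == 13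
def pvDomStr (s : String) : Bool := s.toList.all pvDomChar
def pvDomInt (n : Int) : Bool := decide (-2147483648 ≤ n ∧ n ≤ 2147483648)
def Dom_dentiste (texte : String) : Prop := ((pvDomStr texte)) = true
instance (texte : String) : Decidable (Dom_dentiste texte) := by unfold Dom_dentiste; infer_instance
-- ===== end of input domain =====

-- B: single filter pass over the characters instead of A's head-recursion; Pre_ keeps
-- exactly the inputs where A returns a string (nonempty, last character a vowel).


def pvVoyelles : List Char := ['a','e','i','o','u','y']

-- ===== PORT A =====
-- Literal transliteration of A's recursion on the character list.
-- Python returns None / raises where this helper returns none (None: single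
-- non-vowel base case and its propagation; IndexError: empty string; TypeError:
-- 'vowel + None', modelled by Option.map over a none).
def dentisteAux : List Char → Option String
  | [] => none                                   -- texte[0] on empty: IndexError
  | [c] => if c ∈ pvVoyelles then some (String.ofList [c]) else none
  | c :: rest =>
      if c ∈ pvVoyelles then
        (dentisteAux rest).map (fun s => String.ofList [c] ++ s)
      else
        dentisteAux rest

def dentiste (texte : String) : String := (dentisteAux texte.toList).getD ""

-- ===== PORT B =====
def dentiste_alt (texte : String) : String :=
  String.ofList (texte.toList.filter (fun c => c ∈ pvVoyelles))

-- ===== PRECONDITION & SPEC =====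
-- Pre_ excludes exactly the inputs on which A does not return a string: the empty
-- string (IndexError), strings ending in a non-vowel that contain a vowel
-- (TypeError from str + None), and strings ending in a non-vowel with no vowel
-- at all (A returns None, not a string).
def Pre_dentiste (texte : String) : Prop :=
  texte.toList.getLast?.any (fun c => decide (c ∈ pvVoyelles)) = true
instance (texte : String) : Decidable (Pre_dentiste texte) := by unfold Pre_dentiste; infer_instance

def pvWitness_dentiste : String := "bonjour y"

def Spec_dentiste (texte : String) (out : String) : Prop := out = dentiste_alt texte
instance (texte : String) (out : String) : Decidable (Spec_dentiste texte out) := by unfold Spec_dentiste; infer_instance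

-- ===== CLAIM (what is proved, stated in full; the proofs are below) =====
def Claim_equal_dentiste : Prop := ∀ (texte : String), Dom_dentiste texte → Pre_dentiste texte → Spec_dentiste texte (dentiste texte)

-- ===== LEMMAS AND PROOFS =====
theorem dentisteAux_eq_filter (l : List Char)
    (h : l.getLast?.any (fun c => decide (c ∈ pvVoyelles)) = true) :
    dentisteAux l = some (String.ofList (l.filter (fun c => c ∈ pvVoyelles))) := by
  induction l with
  | nil => simp at h
  | cons c rest ih =>
    cases rest with
    | nil =>
      simp [List.getLast?] at h
      simp [dentisteAux, List.filter, h]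
    | cons d rest' =>
      have hlast : (c :: d :: rest').getLast? = (d :: rest').getLast? := by
        simp [List.getLast?_cons_cons]
      rw [hlast] at h
      have ihr := ih h
      by_cases hc : c ∈ pvVoyelles
      · simp only [dentisteAux, if_pos hc, ihr, Option.map_some]
        have hf := List.filter_cons_of_pos (p := fun x => decide (x ∈ pvVoyelles))
          (l := d :: rest') (a := c) (by simpa using hc)
        rw [hf, ← String.ofList_append]
        rfl
      · simp only [dentisteAux, if_neg hc, ihr]
        have hf := List.filter_cons_of_neg (p := fun x => decide (x ∈ pvVoyelles))
          (l := d :: rest') (a := c) (by simpa using hc)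
        rw [hf]


-- ===== VERDICT (by name: the statement is the Claim_ definition above) =====
theorem dentiste_spec : Claim_equal_dentiste := by
  intro texte _ hpre
  unfold Spec_dentiste dentiste dentiste_alt
  rw [dentisteAux_eq_filter texte.toList hpre]
  rfl
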